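-- pv_equiv track=rewrite | github.com/hfarooqui98/Card-Game-AI | proj3.playincomplete.py | check_suit_play
-- ===== SOURCE A (Python) =====
-- WILD = 'A'
--
-- def phasedout_score(hand):
--     ''' Takes as input the remaining cards in a players hand after the end of a
--     game and adds up the score and returning that'''
--
--     # Returning score
--     score = 0
--
--     # Initializing a dictionary for value and score
--     score_dict = {'A': 25, 'K': 13, 'Q': 12, 'J': 11, '0': 10}
--     for i in range(2, 10):
--         score_dict[str(i)] = i
--
--     # Tallying score
--     for mem in hand:
--         score += score_dict[mem[0]]
--
--     return score
--
-- def check_suit_play(hand, suit_len):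
--     '''Helper function designed to check if, given a set of cards in hand and
--     a desired length of cards, whether a suit phase can be completed and if so
--     what the paly hand should be returning a tuple of the phase (empty if not
--     complete) and possible phase'''
--
--     # Returning value:
--     phase = []
--
--     # setting context in which decisions will be made:
--     # checking amount of aces in hand
--     wild_count = 0
--     wild_cards = []
--     for card in hand:
--         if card[0] == WILD:
--             wild_count += 1
--             wild_cards.append(card)
--
--     # Removing wild cards
--     hand_no_wild = []
--     for card in hand:
--         if card[0] != WILD:
--             hand_no_wild.append(card)
--
--     # sorting on basis of suit
--     suit_sort = []
--     for card in hand_no_wild: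
--         suit_sort.append(card[::-1])
--     suit_sort = sorted(suit_sort)
--
--     # checking to see which suites can be completed with wilds in mind
--     possible_phase = []
--     count = 1
--     for mem in suit_sort:
--         test_suit = mem[0]
--         l = [mem[::-1]]
--         for card in suit_sort[count:]:
--             if card[0] == test_suit:
--                 l.append(card[::-1])
--             else:
--                 break
--         if len(l) + wild_count >= suit_len:
--             possible_phase.append(l)
--         count += 1
--
--     # deciding which phase to complete and retrun if more than one possible
--     max_score = 0
--     max_phase = []
--     for mem in possible_phase:
--         if len(mem) < suit_len:
--             diff = suit_len - len(mem)
--             mem = mem + wild_cards[:(diff + 1)]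
--         if phasedout_score(mem) > max_score:
--             max_score = phasedout_score(mem)
--             max_phase = mem
--         phase = max_phase
--     return (phase, possible_phase)
-- ===== SOURCE B (Python) =====
-- WILD = 'A'
--
-- _SCORES = {'A': 25, 'K': 13, 'Q': 12, 'J': 11, '0': 10,
--            '2': 2, '3': 3, '4': 4, '5': 5, '6': 6, '7': 7, '8': 8, '9': 9}
--
-- def phasedout_score(hand):
--     return sum(_SCORES[card[0]] for card in hand)
--
-- def check_suit_play(hand, suit_len):
--     # wild cards and the rest, reversed so the suit character leads, then sorted
--     wild_cards = [card for card in hand if card[0] == WILD]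
--     wild_count = len(wild_cards)
--     rest = sorted(card[::-1] for card in hand if card[0] != WILD)
--
--     # split the sorted list into contiguous same-suit groups and emit each
--     # group's suffixes (un-reversed) that can reach suit_len with the wilds
--     possible_phase = []
--     while rest:
--         suit = rest[0][0]
--         group = []
--         while rest and rest[0][0] == suit:
--             group.append(rest.pop(0)[::-1])
--         for s in range(len(group)):
--             if len(group) - s + wild_count >= suit_len:
--                 possible_phase.append(group[s:])
--
--     # deciding loop kept as in the original: pad with wilds, strict > tie-break
--     phase = []
--     max_score = 0
--     for mem in possible_phase:
--         if len(mem) < suit_len: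
--             mem = mem + wild_cards[:(suit_len - len(mem) + 1)]
--         if phasedout_score(mem) > max_score:
--             max_score = phasedout_score(mem)
--             phase = mem
--     return (phase, possible_phase)
-- ===== Notes on version B (the rewrite author's own statement) =====
-- stated objective: faster
-- what changed: Replaces A's per-position forward rescans of the sorted suit list (each element re-scans its whole run, quadratic in run length) by a single partition into contiguous same-suit groups that emits each group's qualifying suffixes directly; the deciding loop keeps A's wild padding and strict-> tie-break.
import Mathlib
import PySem

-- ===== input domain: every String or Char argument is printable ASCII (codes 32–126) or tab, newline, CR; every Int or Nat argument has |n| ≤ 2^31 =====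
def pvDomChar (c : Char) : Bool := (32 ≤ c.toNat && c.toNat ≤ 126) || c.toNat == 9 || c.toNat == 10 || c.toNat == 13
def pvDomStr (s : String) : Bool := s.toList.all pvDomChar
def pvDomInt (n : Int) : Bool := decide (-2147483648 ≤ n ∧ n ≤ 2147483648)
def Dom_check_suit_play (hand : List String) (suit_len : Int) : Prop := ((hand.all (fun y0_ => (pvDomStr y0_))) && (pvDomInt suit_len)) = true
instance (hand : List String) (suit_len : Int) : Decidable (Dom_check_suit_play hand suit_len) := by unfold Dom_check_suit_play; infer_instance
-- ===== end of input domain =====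

-- B partitions the sorted suit list into contiguous same-suit groups and emits each group's
-- qualifying suffixes directly, instead of A's per-position forward rescan; same deciding loop.

-- ===== PORT A =====
-- card[0]: cards are nonempty under Pre_ (an empty card raises IndexError); the default is never read there
def pvHead (s : String) : Char := s.toList.headD ' '
-- card[::-1]  (= PySem.Str.slice? s none none (-1), which is String.ofList s.toList.reverse)
def pvRev (s : String) : String := String.ofList s.toList.reverse

-- score_dict literal plus the range(2,10) insertion loop (str(i) is a one-char string)
def pvScoreDictA : PySem.Dict String Int :=
  (PySem.List.pyRange 2 10 1).foldl
    (fun d i => d.insert (PySem.Int.toStr i) i)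
    (PySem.Dict.ofList [("A", 25), ("K", 13), ("Q", 12), ("J", 11), ("0", 10)])

-- score_dict[mem[0]]: the key is present under Pre_, so getD's default is never read
def phasedout_score (hand : List String) : Int :=
  hand.foldl (fun score mem => score + pvScoreDictA.getD (String.ofList [pvHead mem]) 0) 0

-- the inner 'for card in suit_sort[count:]: … else: break' loop
def pvInnerA (test_suit : Char) : List String → List String
  | [] => []
  | card :: rest =>
      if pvHead card == test_suit then pvRev card :: pvInnerA test_suit rest else []

def check_suit_play (hand : List String) (suit_len : Int) : List String × List (List String) :=
  let wc := hand.foldl (fun (st : Int × List String) card =>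
      if pvHead card == 'A' then (st.1 + 1, st.2 ++ [card]) else st) (0, [])
  let wild_count := wc.1
  let wild_cards := wc.2
  let hand_no_wild := hand.foldl (fun acc card =>
      if pvHead card != 'A' then acc ++ [card] else acc) []
  let suit_sort := PySem.List.sorted
      (hand_no_wild.foldl (fun acc card => acc ++ [pvRev card]) []) (fun x => x) false
  let pp := (suit_sort.foldl (fun (st : List (List String) × Int) mem =>
      (if ((((pvRev mem :: pvInnerA (pvHead mem) (PySem.List.slice suit_sort (some st.2) none)).length : Int)
            + wild_count ≥ suit_len) : Prop)
        then st.1 ++ [pvRev mem :: pvInnerA (pvHead mem) (PySem.List.slice suit_sort (some st.2) none)]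
        else st.1, st.2 + 1)) ([], 1)).1
  let fin := pp.foldl (fun (st : Int × List String × List String) mem =>
      let mem := if (mem.length : Int) < suit_len
        then mem ++ PySem.List.slice wild_cards none (some (suit_len - (mem.length : Int) + 1))
        else mem
      if phasedout_score mem > st.1 then (phasedout_score mem, mem, mem)
      else (st.1, st.2.1, st.2.1)) (0, [], [])
  (fin.2.2, pp)

-- ===== PORT B =====
def pvScores : PySem.Dict String Int :=
  PySem.Dict.ofList [("A", 25), ("K", 13), ("Q", 12), ("J", 11), ("0", 10),
    ("2", 2), ("3", 3), ("4", 4), ("5", 5), ("6", 6), ("7", 7), ("8", 8), ("9", 9)]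

def pvScoreB (hand : List String) : Int :=
  (hand.map (fun card => pvScores.getD (String.ofList [pvHead card]) 0)).sum

-- the inner 'while rest and rest[0][0] == suit: group.append(rest.pop(0)[::-1])' loop
def pvTakeGroup (suit : Char) : List String → List String × List String
  | [] => ([], [])
  | c :: cs =>
      if pvHead c == suit then
        ((pvRev c) :: (pvTakeGroup suit cs).1, (pvTakeGroup suit cs).2)
      else ([], c :: cs)

theorem pvTakeGroup_snd_length_le (suit : Char) (xs : List String) :
    (pvTakeGroup suit xs).2.length ≤ xs.length := by
  induction xs with
  | nil => simp [pvTakeGroup]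
  | cons c cs ih =>
    by_cases h : (pvHead c == suit) = true <;> simp [pvTakeGroup, h] <;> omega

-- 'for s in range(len(group)): if len(group)-s+wild_count >= suit_len: possible_phase.append(group[s:])'
def pvEmitGroup (group : List String) (wild_count suit_len : Int) : List (List String) :=
  (PySem.List.pyRange 0 group.length 1).foldl
    (fun acc s => if (group.length : Int) - s + wild_count ≥ suit_len
      then acc ++ [PySem.List.slice group (some s) none] else acc) []

-- the outer 'while rest:' loop consuming one suit group per iteration
def pvGroups (wild_count suit_len : Int) : List String → List (List String)
  | [] => []
  | c :: cs =>
      pvEmitGroup (pvRev c :: (pvTakeGroup (pvHead c) cs).1) wild_count suit_len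
        ++ pvGroups wild_count suit_len (pvTakeGroup (pvHead c) cs).2
termination_by xs => xs.length
decreasing_by
  have := pvTakeGroup_snd_length_le (pvHead c) cs
  simp only [List.length_cons]; omega

def check_suit_play_alt (hand : List String) (suit_len : Int) : List String × List (List String) :=
  let wild_cards := hand.filter (fun card => pvHead card == 'A')
  let wild_count : Int := wild_cards.length
  let rest := PySem.List.sorted
      ((hand.filter (fun card => pvHead card != 'A')).map pvRev) (fun x => x) false
  let possible_phase := pvGroups wild_count suit_len rest
  let fin := possible_phase.foldl (fun (st : List String × Int) mem =>
      let mem := if (mem.length : Int) < suit_len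
        then mem ++ PySem.List.slice wild_cards none (some (suit_len - (mem.length : Int) + 1))
        else mem
      if pvScoreB mem > st.2 then (mem, pvScoreB mem) else st) ([], 0)
  (fin.1, possible_phase)

-- ===== PRECONDITION & SPEC =====
def pvLast (s : String) : Char := s.toList.getLastD ' '
def pvValidChar (c : Char) : Prop :=
  c ∈ (['K', 'Q', 'J', '0', '2', '3', '4', '5', '6', '7', '8', '9'] : List Char)

-- Pre_ = exactly the inputs on which the Python A returns normally: no empty card (card[0] would
-- raise IndexError) and no card with an invalid value character inside a suit group large enough
-- to enter possible_phase (where phasedout_score would raise KeyError).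
def Pre_check_suit_play (hand : List String) (suit_len : Int) : Prop :=
  (∀ c ∈ hand, c ≠ "") ∧
  (∀ c ∈ hand, pvHead c ≠ 'A' → pvValidChar (pvHead c) ∨
    ((hand.filter (fun d => decide (pvHead d ≠ 'A') && decide (pvLast d = pvLast c))).length : Int)
      + ((hand.filter (fun d => decide (pvHead d = 'A'))).length : Int) < suit_len)
instance (hand : List String) (suit_len : Int) : Decidable (Pre_check_suit_play hand suit_len) := by
  unfold Pre_check_suit_play pvValidChar; infer_instance

def pvWitness_check_suit_play : List String × Int := (["2H", "3H", "AS"], 2)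

def Spec_check_suit_play (hand : List String) (suit_len : Int) (out : List String × List (List String)) : Prop := out = check_suit_play_alt hand suit_len
instance (hand : List String) (suit_len : Int) (out : List String × List (List String)) : Decidable (Spec_check_suit_play hand suit_len out) := by unfold Spec_check_suit_play; infer_instance

-- ===== CLAIM (what is proved, stated in full; the proofs are below) =====
def Claim_equal_check_suit_play : Prop := ∀ (hand : List String) (suit_len : Int), Dom_check_suit_play hand suit_len → Pre_check_suit_play hand suit_len → Spec_check_suit_play hand suit_len (check_suit_play hand suit_len)

-- ===== LEMMAS AND PROOFS =====

theorem score_eq (hand : List String) : phasedout_score hand = pvScoreB hand := by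
  have hd : pvScoreDictA = pvScores := by decide
  unfold phasedout_score pvScoreB
  rw [hd, PySem.List.foldl_add]
  simp


-- proof-only restatement of A's per-position loop as structural recursion
def pvRecA (wc sl : Int) : List String → List (List String)
  | [] => []
  | m :: ms =>
      (if ((pvRev m :: pvInnerA (pvHead m) ms).length : Int) + wc ≥ sl
        then [pvRev m :: pvInnerA (pvHead m) ms] else []) ++ pvRecA wc sl ms

theorem takeGroup_eq (h : Char) (xs : List String) :
    pvTakeGroup h xs
      = ((xs.takeWhile (fun c => pvHead c == h)).map pvRev,
         xs.dropWhile (fun c => pvHead c == h)) := by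
  induction xs with
  | nil => rfl
  | cons c cs ih =>
    by_cases hc : (pvHead c == h) = true
    · simp [pvTakeGroup, List.takeWhile, List.dropWhile, hc, ih]
    · simp [pvTakeGroup, List.takeWhile, List.dropWhile, hc]

theorem map_filter_range_congr {α : Type} (n : Nat) (F1 F2 : Int → α) (Q1 Q2 : Int → Bool)
    (G1 G2 : Nat → Int)
    (hQ : ∀ k, k < n → Q1 (G1 k) = Q2 (G2 k)) (hF : ∀ k, k < n → Q1 (G1 k) = true → F1 (G1 k) = F2 (G2 k)) :
    List.map F1 (List.filter Q1 (List.map G1 (List.range n)))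
      = List.map F2 (List.filter Q2 (List.map G2 (List.range n))) := by
  induction n with
  | zero => rfl
  | succ m ih =>
    rw [List.range_succ, List.map_append, List.map_append, List.filter_append, List.filter_append,
      List.map_append, List.map_append]
    rw [ih (fun k hk => hQ k (by omega)) (fun k hk => hF k (by omega))]
    congr 1
    simp only [List.map_cons, List.map_nil, List.filter]
    rw [hQ m (by omega)]
    cases hq : Q2 (G2 m) with
    | false => rfl
    | true => simp [hF m (by omega) (by rw [hQ m (by omega)]; exact hq)]

theorem emitGroup_cons (x : String) (g : List String) (wc sl : Int) :
    pvEmitGroup (x :: g) wc sl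
      = (if ((x :: g).length : Int) + wc ≥ sl then [x :: g] else []) ++ pvEmitGroup g wc sl := by
  unfold pvEmitGroup
  rw [PySem.List.foldl_append_ite, PySem.List.foldl_append_ite]
  rw [PySem.List.pyRange_one, PySem.List.pyRange_one]
  simp only [Int.sub_zero, Int.toNat_natCast, List.length_cons, List.nil_append]
  rw [List.range_succ_eq_map]
  simp only [List.map_cons, List.map_map]
  rw [List.filter_cons]
  rw [show ((fun k : Nat => (0:Int) + ↑k) ∘ Nat.succ) = (fun k : Nat => (0:Int) + ↑(k.succ)) from rfl]
  split_ifs with h1 h2 h2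
  · rw [List.map_cons, List.singleton_append]
    congr 1
    · norm_num
    · refine map_filter_range_congr _ _ _ _ _ _ _ ?_ ?_
      · intro k hk
        rw [decide_eq_decide]
        push_cast
        omega
      · intro k hk _
        simp only [zero_add]
        rw [PySem.List.slice_from_natCast, PySem.List.slice_from_natCast]
        simp
  · rw [decide_eq_true_eq] at h1; push_cast at h1 h2; omega
  · rw [decide_eq_true_eq] at h1; push_cast at h1 h2; omega
  · rw [List.nil_append]
    refine map_filter_range_congr _ _ _ _ _ _ _ ?_ ?_
    · intro k hk
      rw [decide_eq_decide]
      push_cast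
      omega
    · intro k hk _
      simp only [zero_add]
      rw [PySem.List.slice_from_natCast, PySem.List.slice_from_natCast]
      simp


theorem inner_group (t : List String) (r : List String) (h : Char)
    (ht : ∀ x ∈ t, pvHead x = h) (hr : ∀ y, r.head? = some y → pvHead y ≠ h) :
    pvInnerA h (t ++ r) = t.map pvRev := by
  induction t with
  | nil =>
    cases r with
    | nil => rfl
    | cons y ys =>
      have : ¬ (pvHead y == h) = true := by
        simpa using hr y rfl
      simp [pvInnerA, this]
  | cons u t' ih =>
    have hu : (pvHead u == h) = true := by simp [ht u (by simp)]
    simp only [List.cons_append, pvInnerA, hu, if_pos]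
    rw [ih (fun x hx => ht x (by simp [hx]))]
    simp


theorem recA_group (wc sl : Int) (t : List String) : ∀ (c : String) (r : List String),
    (∀ x ∈ t, pvHead x = pvHead c) →
    (∀ y, r.head? = some y → pvHead y ≠ pvHead c) →
    pvRecA wc sl (c :: (t ++ r))
      = pvEmitGroup (pvRev c :: t.map pvRev) wc sl ++ pvRecA wc sl r := by
  induction t with
  | nil =>
    intro c r ht hr
    simp only [List.nil_append, pvRecA, List.map_nil]
    have hi := inner_group [] r (pvHead c) (by simp) hr
    simp only [List.nil_append, List.map_nil] at hi
    rw [hi]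
    rw [emitGroup_cons]
    have : pvEmitGroup [] wc sl = [] := rfl
    simp [this]
  | cons u t' ih =>
    intro c r ht hr
    have hu : pvHead u = pvHead c := ht u (by simp)
    have ht' : ∀ x ∈ t', pvHead x = pvHead u := by
      intro x hx; rw [hu]; exact ht x (by simp [hx])
    have hr' : ∀ y, r.head? = some y → pvHead y ≠ pvHead u := by
      intro y hy; rw [hu]; exact hr y hy
    have hgoal : pvRecA wc sl (c :: ((u :: t') ++ r)) =
        (if ((pvRev c :: pvInnerA (pvHead c) ((u :: t') ++ r)).length : Int) + wc ≥ sl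
          then [pvRev c :: pvInnerA (pvHead c) ((u :: t') ++ r)] else [])
          ++ pvRecA wc sl (u :: (t' ++ r)) := rfl
    rw [show c :: (u :: t' ++ r) = c :: ((u :: t') ++ r) from rfl, hgoal]
    rw [inner_group (u :: t') r (pvHead c) ht hr]
    rw [ih u r ht' hr']
    rw [List.map_cons]
    rw [emitGroup_cons (pvRev c) (pvRev u :: t'.map pvRev) wc sl]
    simp [List.append_assoc]


theorem groups_eq_aux (wc sl : Int) : ∀ (n : Nat) (xs : List String), xs.length ≤ n →
    pvGroups wc sl xs = pvRecA wc sl xs := by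
  intro n
  induction n with
  | zero =>
    intro xs hx
    have : xs = [] := List.eq_nil_of_length_eq_zero (by omega)
    subst this; rw [pvGroups]; rfl
  | succ m ih =>
    intro xs hx
    cases xs with
    | nil => rw [pvGroups]; rfl
    | cons c cs =>
      rw [pvGroups]
      rw [takeGroup_eq]
      have hsplit : cs = cs.takeWhile (fun c' => pvHead c' == pvHead c)
          ++ cs.dropWhile (fun c' => pvHead c' == pvHead c) :=
        (List.takeWhile_append_dropWhile).symm
      have ht : ∀ x ∈ cs.takeWhile (fun c' => pvHead c' == pvHead c), pvHead x = pvHead c := by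
        intro x hx'
        have := List.mem_takeWhile_imp hx'
        simpa using this
      have hr : ∀ y, (cs.dropWhile (fun c' => pvHead c' == pvHead c)).head? = some y →
          pvHead y ≠ pvHead c := by
        intro y hy
        have := List.head?_dropWhile_not (p := fun c' => pvHead c' == pvHead c) (l := cs)
        rw [hy] at this
        simpa using this
      have hlen : (cs.dropWhile (fun c' => pvHead c' == pvHead c)).length ≤ m := by
        have := List.length_dropWhile_le (p := fun c' => pvHead c' == pvHead c) (l := cs)
        simp at hx
        omega
      rw [ih _ hlen]
      rw [← recA_group wc sl _ c _ ht hr]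
      rw [← hsplit]

theorem foldA_aux (xs : List String) (wc sl : Int) :
    ∀ (n k : Nat) (acc : List (List String)), xs.length ≤ k + n →
    ((xs.drop k).foldl (fun (st : List (List String) × Int) mem =>
      (if ((((pvRev mem :: pvInnerA (pvHead mem) (PySem.List.slice xs (some st.2) none)).length : Int)
            + wc ≥ sl) : Prop)
        then st.1 ++ [pvRev mem :: pvInnerA (pvHead mem) (PySem.List.slice xs (some st.2) none)]
        else st.1, st.2 + 1)) (acc, (k : Int) + 1)).1 = acc ++ pvRecA wc sl (xs.drop k) := by
  intro n
  induction n with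
  | zero =>
    intro k acc hk
    rw [List.drop_eq_nil_of_le (by omega)]
    simp [pvRecA]
  | succ m ih =>
    intro k acc hk
    cases hdk : xs.drop k with
    | nil => simp [pvRecA]
    | cons c cs =>
      have hcs : xs.drop (k + 1) = cs := by
        rw [← List.tail_drop]
        rw [hdk]
        rfl
      rw [List.foldl_cons]
      have hslice : PySem.List.slice xs (some ((k : Int) + 1)) none = cs := by
        rw [show ((k : Int) + 1) = ((k + 1 : Nat) : Int) by push_cast; ring]
        rw [PySem.List.slice_from_natCast]
        exact hcs
      simp only [hslice]
      have step := ih (k + 1)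
        (if (((pvRev c :: pvInnerA (pvHead c) cs).length : Int) + wc ≥ sl)
          then acc ++ [pvRev c :: pvInnerA (pvHead c) cs] else acc) (by omega)
      rw [hcs] at step
      rw [show ((k : Int) + 1 + 1) = (((k + 1 : Nat) : Int) + 1) by push_cast; ring]
      rw [step]
      rw [pvRecA]
      split_ifs with h
      · simp
      · simp

theorem foldA_eq (xs : List String) (wc sl : Int) :
    (xs.foldl (fun (st : List (List String) × Int) mem =>
      (if ((((pvRev mem :: pvInnerA (pvHead mem) (PySem.List.slice xs (some st.2) none)).length : Int)
            + wc ≥ sl) : Prop)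
        then st.1 ++ [pvRev mem :: pvInnerA (pvHead mem) (PySem.List.slice xs (some st.2) none)]
        else st.1, st.2 + 1)) ([], 1)).1 = pvRecA wc sl xs := by
  have h := foldA_aux xs wc sl xs.length 0 [] (by omega)
  simpa using h

theorem fin_eq (wild_cards : List String) (suit_len : Int) (pp : List (List String)) :
    ∀ (ms : Int) (mp : List String),
    ((pp.foldl (fun (st : Int × List String × List String) mem =>
      let mem := if (mem.length : Int) < suit_len
        then mem ++ PySem.List.slice wild_cards none (some (suit_len - (mem.length : Int) + 1))
        else mem
      if phasedout_score mem > st.1 then (phasedout_score mem, mem, mem)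
      else (st.1, st.2.1, st.2.1)) (ms, mp, mp)).2.2)
    = ((pp.foldl (fun (st : List String × Int) mem =>
      let mem := if (mem.length : Int) < suit_len
        then mem ++ PySem.List.slice wild_cards none (some (suit_len - (mem.length : Int) + 1))
        else mem
      if pvScoreB mem > st.2 then (mem, pvScoreB mem) else st) (mp, ms)).1) := by
  induction pp with
  | nil => intro ms mp; rfl
  | cons mem pp ih =>
    intro ms mp
    rw [List.foldl_cons, List.foldl_cons]
    show (List.foldl (fun (st : Int × List String × List String) mem =>
      let mem := if (mem.length : Int) < suit_len
        then mem ++ PySem.List.slice wild_cards none (some (suit_len - (mem.length : Int) + 1))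
        else mem
      if phasedout_score mem > st.1 then (phasedout_score mem, mem, mem)
      else (st.1, st.2.1, st.2.1))
      (if phasedout_score (if (mem.length : Int) < suit_len
        then mem ++ PySem.List.slice wild_cards none (some (suit_len - (mem.length : Int) + 1))
        else mem) > ms
        then (phasedout_score (if (mem.length : Int) < suit_len
        then mem ++ PySem.List.slice wild_cards none (some (suit_len - (mem.length : Int) + 1))
        else mem), (if (mem.length : Int) < suit_len
        then mem ++ PySem.List.slice wild_cards none (some (suit_len - (mem.length : Int) + 1))
        else mem), (if (mem.length : Int) < suit_len
        then mem ++ PySem.List.slice wild_cards none (some (suit_len - (mem.length : Int) + 1))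
        else mem))
        else (ms, mp, mp)) pp).2.2
      = (List.foldl (fun (st : List String × Int) mem =>
      let mem := if (mem.length : Int) < suit_len
        then mem ++ PySem.List.slice wild_cards none (some (suit_len - (mem.length : Int) + 1))
        else mem
      if pvScoreB mem > st.2 then (mem, pvScoreB mem) else st)
      (if pvScoreB (if (mem.length : Int) < suit_len
        then mem ++ PySem.List.slice wild_cards none (some (suit_len - (mem.length : Int) + 1))
        else mem) > ms
        then ((if (mem.length : Int) < suit_len
        then mem ++ PySem.List.slice wild_cards none (some (suit_len - (mem.length : Int) + 1))
        else mem), pvScoreB (if (mem.length : Int) < suit_len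
        then mem ++ PySem.List.slice wild_cards none (some (suit_len - (mem.length : Int) + 1))
        else mem))
        else (mp, ms)) pp).1

    rw [score_eq (if (mem.length : Int) < suit_len
        then mem ++ PySem.List.slice wild_cards none (some (suit_len - (mem.length : Int) + 1))
        else mem)]
    by_cases h : pvScoreB (if (mem.length : Int) < suit_len
        then mem ++ PySem.List.slice wild_cards none (some (suit_len - (mem.length : Int) + 1))
        else mem) > ms
    · rw [if_pos h, if_pos h]
      exact ih _ _
    · rw [if_neg h, if_neg h]
      exact ih _ _


-- ===== VERDICT (by name: the statement is the Claim_ definition above) =====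
theorem check_suit_play_spec : Claim_equal_check_suit_play := by
  intro hand suit_len _ _
  unfold Spec_check_suit_play
  simp only [check_suit_play, check_suit_play_alt]
  have hwild : hand.foldl (fun (st : Int × List String) card =>
      if pvHead card == 'A' then (st.1 + 1, st.2 ++ [card]) else st) (0, [])
      = ((hand.countP (fun c => pvHead c == 'A') : Int),
         hand.filter (fun c => pvHead c == 'A')) := by
    rw [show (fun (st : Int × List String) card =>
        if pvHead card == 'A' then (st.1 + 1, st.2 ++ [card]) else st)
      = (fun (st : Int × List String) card =>
        (if pvHead card == 'A' then st.1 + 1 else st.1,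
         if pvHead card == 'A' then st.2 ++ [card] else st.2)) from
      funext fun st => funext fun card => by split_ifs <;> rfl]
    rw [PySem.List.foldl_prod_mk
      (f := fun (a : Int) card => if pvHead card == 'A' then a + 1 else a)
      (g := fun (b : List String) card => if pvHead card == 'A' then b ++ [card] else b)]
    rw [PySem.List.foldl_if_add_one]
    rw [PySem.List.foldl_append_if_eq_filter]
    simp
  rw [hwild]
  simp only [List.countP_eq_length_filter]
  rw [PySem.List.foldl_append_if_eq_filter]
  rw [PySem.List.foldl_append_singleton_eq_map]
  simp only [List.nil_append]
  rw [foldA_eq]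
  rw [groups_eq_aux _ _ _ _ (le_refl _)]
  rw [fin_eq]
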